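-- pv_equiv track=rewrite | github.com/chekdata/memor-upload | packages/chek-app-cli/scripts/generate_openapi_registry.py | unique_method_key
-- ===== SOURCE A (Python) =====
-- from typing import Any
--
-- def unique_method_key(methods: dict[str, Any], key: str, method: str) -> str:
--     if key not in methods:
--         return key
--     suffixed = key + method.title()
--     if suffixed not in methods:
--         return suffixed
--     index = 2
--     while f"{suffixed}{index}" in methods:
--         index += 1
--     return f"{suffixed}{index}"
-- ===== SOURCE B (Python) =====
-- def unique_method_key(methods, key, method):
--     suffixed = key + method.title()
--     key_taken = False
--     suffixed_taken = False
--     idxs = []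
--     for k in methods:
--         if k == key:
--             key_taken = True
--         if k == suffixed:
--             suffixed_taken = True
--         elif k.startswith(suffixed):
--             tail = k[len(suffixed):]
--             if tail.isdigit() and str(int(tail)) == tail and int(tail) >= 2:
--                 idxs.append(int(tail))
--     if not key_taken:
--         return key
--     if not suffixed_taken:
--         return suffixed
--     ans = 2
--     for i in sorted(idxs):
--         if i == ans:
--             ans += 1
--         elif i > ans:
--             break
--     return suffixed + str(ans)
-- ===== Notes on version B (the rewrite author's own statement) =====
-- stated objective: alternative
-- what changed: B never probes candidate keys against the dict: one pass over the keys parses the numeric suffixes already used into a list of integers, then the answer is the first gap found by scanning that sorted list with a counter, replacing A's while-loop of repeated membership probes.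
import Mathlib
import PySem

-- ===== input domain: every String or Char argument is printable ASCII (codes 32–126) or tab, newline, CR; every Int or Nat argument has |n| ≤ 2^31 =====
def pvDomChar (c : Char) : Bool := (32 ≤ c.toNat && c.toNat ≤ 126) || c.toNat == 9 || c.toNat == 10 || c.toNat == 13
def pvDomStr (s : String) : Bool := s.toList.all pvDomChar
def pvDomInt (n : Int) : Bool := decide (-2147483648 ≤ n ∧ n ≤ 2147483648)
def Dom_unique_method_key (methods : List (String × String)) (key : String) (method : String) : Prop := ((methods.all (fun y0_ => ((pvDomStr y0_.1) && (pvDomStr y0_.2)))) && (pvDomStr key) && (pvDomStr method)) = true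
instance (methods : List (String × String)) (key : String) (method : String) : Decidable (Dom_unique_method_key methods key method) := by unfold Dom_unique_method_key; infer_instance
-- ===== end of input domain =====

-- B never probes candidate keys against the dict: one pass over the keys parses the
-- numeric suffixes already in use into a list of integers, and the answer is the first
-- gap found by scanning that sorted list with a counter (objective: alternative;
-- same observable behaviour).

-- ===== PORT A =====

-- shared primitive: str.title() for the ASCII domain (Python: uppercase a letter
-- after a non-letter, lowercase a letter after a letter; non-letters unchanged)
def pyTitleChars : List Char → Bool → List Char
  | [], _ => []
  | c :: rest, prev =>
      if PySem.Chars.isalpha c then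
        (if prev then PySem.Chars.lowerChar c else PySem.Chars.upperChar c) :: pyTitleChars rest true
      else
        c :: pyTitleChars rest false

def pyTitle (s : String) : String := String.ofList (pyTitleChars s.toList false)

-- A's while loop: 'while f"{suffixed}{index}" in methods: index += 1'; fuel = |methods| + 1
-- always suffices in Python (the probed candidates are pairwise distinct strings), the
-- fuel-exhausted arm is unreachable there.
def uniqLoopA (keys : List String) (suffixed : String) (index : Int) : Nat → String
  | 0 => suffixed ++ PySem.Int.toStr index
  | fuel + 1 =>
      if keys.contains (suffixed ++ PySem.Int.toStr index) then
        uniqLoopA keys suffixed (index + 1) fuel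
      else
        suffixed ++ PySem.Int.toStr index

def unique_method_key (methods : List (String × String)) (key : String) (method : String) : String :=
  let keys := methods.map Prod.fst
  if ¬ keys.contains key then key
  else
    let suffixed := key ++ pyTitle method
    if ¬ keys.contains suffixed then suffixed
    else uniqLoopA keys suffixed 2 (methods.length + 1)

-- ===== PORT B =====

-- int(tail) hand-ported as the decimal fold; exact here because Source B evaluates it only
-- under the tail.isdigit() guard (a nonempty string of ASCII digits, no sign/space/'_').
def decFoldInt (cs : List Char) : Int := cs.foldl (fun a c => 10 * a + ((c.toNat : Int) - 48)) 0

-- loop body of Source B's single pass over the keys: state (key_taken, suffixed_taken, idxs)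
def collectStep (key suffixed : String) (st : Bool × Bool × List Int) (k : String) : Bool × Bool × List Int :=
  let kt := st.1 || (k == key)
  if k == suffixed then (kt, true, st.2.2)
  else if PySem.Str.startswith k suffixed then
    let tail := PySem.Str.slice k (some (PySem.Str.len suffixed)) none
    if PySem.Str.strIsdigit tail then
      let j := decFoldInt tail.toList
      if (PySem.Int.toStr j == tail && decide (2 ≤ j)) then (kt, st.2.1, st.2.2 ++ [j])
      else (kt, st.2.1, st.2.2)
    else (kt, st.2.1, st.2.2)
  else (kt, st.2.1, st.2.2)

-- Source B's 'for i in sorted(idxs): …' gap scan with break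
def gapScan : List Int → Int → Int
  | [], a => a
  | i :: rest, a => if i = a then gapScan rest (a + 1) else if a < i then a else gapScan rest a

def unique_method_key_alt (methods : List (String × String)) (key : String) (method : String) : String :=
  let keys := methods.map Prod.fst
  let suffixed := key ++ pyTitle method
  let st := keys.foldl (collectStep key suffixed) (false, false, [])
  if ¬ st.1 then key
  else if ¬ st.2.1 then suffixed
  else suffixed ++ PySem.Int.toStr (gapScan (PySem.List.sorted st.2.2 (fun x => x) false) 2)

-- ===== PRECONDITION & SPEC =====
def Spec_unique_method_key (methods : List (String × String)) (key : String) (method : String) (out : String) : Prop := out = unique_method_key_alt methods key method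
instance (methods : List (String × String)) (key : String) (method : String) (out : String) : Decidable (Spec_unique_method_key methods key method out) := by unfold Spec_unique_method_key; infer_instance

-- ===== CLAIM (what is proved, stated in full; the proofs are below) =====
def Claim_equal_unique_method_key : Prop := ∀ (methods : List (String × String)) (key : String) (method : String), Dom_unique_method_key methods key method → Spec_unique_method_key methods key method (unique_method_key methods key method)

-- ===== LEMMAS AND PROOFS =====

-- ---- decimal-numeral groundwork (Nat.toDigits 10) ----

theorem td_core_acc (f : Nat) : ∀ (n : Nat) (acc : List Char),
    Nat.toDigitsCore 10 f n acc = Nat.toDigitsCore 10 f n [] ++ acc := by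
  induction f with
  | zero => intro n acc; simp [Nat.toDigitsCore]
  | succ f ih =>
    intro n acc
    simp only [Nat.toDigitsCore]
    by_cases h : n / 10 = 0
    · simp [h]
    · simp only [h, if_false]
      rw [ih (n / 10) [Nat.digitChar (n % 10)], ih (n / 10) (Nat.digitChar (n % 10) :: acc)]
      simp

theorem td_core_fuel (n : Nat) : ∀ (f g : Nat), n < f → n < g →
    Nat.toDigitsCore 10 f n [] = Nat.toDigitsCore 10 g n [] := by
  induction n using Nat.strong_induction_on with
  | _ n ih =>
    intro f g hf hg
    match f, g with
    | f + 1, g + 1 =>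
      simp only [Nat.toDigitsCore]
      by_cases h : n / 10 = 0
      · simp [h]
      · simp only [h, if_false]
        have hlt : n / 10 < n := Nat.div_lt_self (by omega) (by norm_num)
        rw [td_core_acc f, td_core_acc g, ih (n / 10) hlt f g (by omega) (by omega)]

theorem td_lt (n : Nat) (h : n < 10) : Nat.toDigits 10 n = [Nat.digitChar n] := by
  simp [Nat.toDigits, Nat.toDigitsCore, Nat.div_eq_of_lt h, Nat.mod_eq_of_lt h]

theorem td_core_succ (f n : Nat) (acc : List Char) :
    Nat.toDigitsCore 10 (f + 1) n acc
      = if n / 10 = 0 then Nat.digitChar (n % 10) :: acc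
        else Nat.toDigitsCore 10 f (n / 10) (Nat.digitChar (n % 10) :: acc) := by
  simp [Nat.toDigitsCore]

theorem td_ge (n : Nat) (h : 10 ≤ n) :
    Nat.toDigits 10 n = Nat.toDigits 10 (n / 10) ++ [Nat.digitChar (n % 10)] := by
  have h0 : n / 10 ≠ 0 := by omega
  have hlt : n / 10 < n := Nat.div_lt_self (by omega) (by norm_num)
  show Nat.toDigitsCore 10 (n + 1) n [] = Nat.toDigitsCore 10 (n / 10 + 1) (n / 10) [] ++ [Nat.digitChar (n % 10)]
  rw [td_core_succ, if_neg h0, td_core_acc n, td_core_fuel (n / 10) n (n / 10 + 1) hlt (by omega)]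

theorem digitChar_toNat (k : Nat) (h : k < 10) : (Nat.digitChar k).toNat = 48 + k := by
  interval_cases k <;> decide

theorem digitChar_isdigit (k : Nat) (h : k < 10) : PySem.Chars.isdigit (Nat.digitChar k) = true := by
  interval_cases k <;> decide

theorem td_ne_nil (n : Nat) : Nat.toDigits 10 n ≠ [] := by
  by_cases h : n < 10
  · rw [td_lt n h]; simp
  · rw [td_ge n (by omega)]; simp

theorem td_all_digit (n : Nat) : ∀ c ∈ Nat.toDigits 10 n, PySem.Chars.isdigit c = true := by
  induction n using Nat.strong_induction_on with
  | _ n ih =>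
    by_cases h : n < 10
    · rw [td_lt n h]
      intro c hc
      rw [List.mem_singleton] at hc
      subst hc
      exact digitChar_isdigit n h
    · rw [td_ge n (by omega)]
      intro c hc
      rcases List.mem_append.mp hc with hc | hc
      · exact ih (n / 10) (Nat.div_lt_self (by omega) (by norm_num)) c hc
      · rw [List.mem_singleton] at hc
        subst hc
        exact digitChar_isdigit _ (Nat.mod_lt _ (by norm_num))

theorem decFold_td (n : Nat) : decFoldInt (Nat.toDigits 10 n) = (n : Int) := by
  induction n using Nat.strong_induction_on with
  | _ n ih =>
    by_cases h : n < 10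
    · rw [td_lt n h]
      simp [decFoldInt, digitChar_toNat n h]
    · rw [td_ge n (by omega)]
      unfold decFoldInt
      rw [List.foldl_append]
      have := ih (n / 10) (Nat.div_lt_self (by omega) (by norm_num))
      unfold decFoldInt at this
      rw [this]
      simp only [List.foldl_cons, List.foldl_nil, digitChar_toNat (n % 10) (Nat.mod_lt _ (by norm_num))]
      push_cast
      omega

-- ---- bridge to PySem.Int.toStr ----

theorem toChars_of_nonneg (i : Int) (h : 0 ≤ i) : PySem.Int.toChars i = Nat.toDigits 10 i.toNat := by
  simp [PySem.Int.toChars, not_lt.mpr h]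

theorem toStr_toList (i : Int) : (PySem.Int.toStr i).toList = PySem.Int.toChars i :=
  PySem.Int.toList_toStr i

theorem strIsdigit_toStr (i : Int) (h : 0 ≤ i) : PySem.Str.strIsdigit (PySem.Int.toStr i) = true := by
  rw [PySem.Str.strIsdigit_eq, toStr_toList, toChars_of_nonneg i h]
  unfold PySem.Chars.strIsdigit
  rw [Bool.and_eq_true]
  constructor
  · simp [td_ne_nil]
  · rw [List.all_eq_true]
    exact td_all_digit i.toNat

theorem decFold_toStr (i : Int) (h : 0 ≤ i) : decFoldInt (PySem.Int.toStr i).toList = i := by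
  rw [toStr_toList, toChars_of_nonneg i h, decFold_td, Int.toNat_of_nonneg h]

theorem toStr_ne_empty (i : Int) (h : 0 ≤ i) : PySem.Int.toStr i ≠ "" := by
  intro hc
  have := congrArg String.toList hc
  rw [toStr_toList, toChars_of_nonneg i h] at this
  exact td_ne_nil i.toNat (by simpa using this)

theorem toStr_inj (i j : Int) (hi : 0 ≤ i) (hj : 0 ≤ j)
    (h : PySem.Int.toStr i = PySem.Int.toStr j) : i = j := by
  have h2 : decFoldInt (PySem.Int.toStr i).toList = decFoldInt (PySem.Int.toStr j).toList := by
    rw [h]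
  rw [decFold_toStr i hi, decFold_toStr j hj] at h2
  exact h2

-- ---- a key k has suffix t after prefix S exactly when k = S ++ t ----

theorem startswith_slice_iff (k S t : String) :
    (PySem.Str.startswith k S = true ∧ PySem.Str.slice k (some (PySem.Str.len S)) none = t)
      ↔ k = S ++ t := by
  constructor
  · rintro ⟨hp, hs⟩
    have hp' : S.toList <+: k.toList := by simpa [PySem.Chars.startswith_iff] using hp
    have hs' : k.toList.drop S.toList.length = t.toList := by
      have := congrArg String.toList hs
      simpa [pysem, PySem.List.slice_from_natCast] using this
    obtain ⟨r, hr⟩ := hp'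
    rw [← hr] at hs'
    rw [List.drop_left] at hs'
    rw [← String.toList_inj, String.toList_append, ← hr, hs']
  · intro hk
    subst hk
    refine ⟨by rw [PySem.Str.startswith_eq, PySem.Chars.startswith_iff]
               exact ⟨t.toList, by simp⟩, ?_⟩
    rw [← String.toList_inj]
    simp [pysem, PySem.List.slice_from_natCast]

-- ---- characterisation of B's single pass ----

-- what one key contributes to idxs (proof-side restatement of collectStep's third component)
def emit (S k : String) : List Int :=
  if k == S then []
  else if PySem.Str.startswith k S then
    let tail := PySem.Str.slice k (some (PySem.Str.len S)) none
    if PySem.Str.strIsdigit tail then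
      let j := decFoldInt tail.toList
      if (PySem.Int.toStr j == tail && decide (2 ≤ j)) then [j] else []
    else []
  else []

theorem collectStep_eq (key S : String) (st : Bool × Bool × List Int) (k : String) :
    collectStep key S st k = (st.1 || (k == key), st.2.1 || (k == S), st.2.2 ++ emit S k) := by
  unfold collectStep emit
  dsimp only
  split_ifs with h1 h2 h3 h4 <;> simp [h1]

theorem fold_collect (key S : String) : ∀ (ks : List String) (b p : Bool) (l : List Int),
    ks.foldl (collectStep key S) (b, p, l)
      = (b || ks.any (· == key), p || ks.any (· == S), l ++ ks.flatMap (emit S)) := by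
  intro ks
  induction ks with
  | nil => intro b p l; simp
  | cons k ks ih =>
    intro b p l
    rw [List.foldl_cons, collectStep_eq, ih]
    simp [Bool.or_assoc, List.flatMap_cons]

theorem mem_emit_iff (S k : String) (i : Int) :
    i ∈ emit S k ↔ (2 ≤ i ∧ k = S ++ PySem.Int.toStr i) := by
  constructor
  · intro h
    unfold emit at h
    dsimp only at h
    split_ifs at h with h1 h2 h3 h4
    all_goals try exact absurd h List.not_mem_nil
    rw [List.mem_singleton] at h
    rw [Bool.and_eq_true, beq_iff_eq, decide_eq_true_iff] at h4
    subst h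
    exact ⟨h4.2, (startswith_slice_iff k S _).mp ⟨h2, h4.1.symm⟩⟩
  · rintro ⟨h2i, hk⟩
    have h0i : (0 : Int) ≤ i := by omega
    have hsw := (startswith_slice_iff k S (PySem.Int.toStr i)).mpr hk
    have hne : (k == S) = false := by
      rw [beq_eq_false_iff_ne]
      intro hc
      rw [hc] at hk
      have hts : PySem.Int.toStr i = "" := by
        have h3 := congrArg String.toList hk
        rw [String.toList_append] at h3
        rw [← String.toList_inj]
        have h4 : S.toList = S.toList ++ (PySem.Int.toStr i).toList := h3
        have := List.self_eq_append_right.mp h4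
        simpa using this
      exact toStr_ne_empty i h0i hts
    unfold emit
    dsimp only
    rw [hne]
    simp only [Bool.false_eq_true, if_false, hsw.1, if_true, hsw.2]
    rw [strIsdigit_toStr i h0i, if_pos rfl]
    rw [decFold_toStr i h0i]
    simp [h2i]

-- ---- A's probe loop returns the first free index ----

theorem loopA_eq (keys : List String) (S : String) (N : Nat)
    (hnot : keys.contains (S ++ PySem.Int.toStr (2 + (N : Int))) = false)
    (hmin : ∀ t : Nat, t < N → keys.contains (S ++ PySem.Int.toStr (2 + (t : Int))) = true) :
    ∀ (fuel k : Nat), k ≤ N → N - k < fuel →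
      uniqLoopA keys S (2 + (k : Int)) fuel = S ++ PySem.Int.toStr (2 + (N : Int)) := by
  intro fuel
  induction fuel with
  | zero => intro k _ h; omega
  | succ f ih =>
    intro k hkN hf
    unfold uniqLoopA
    by_cases hk : k = N
    · subst hk
      rw [hnot]
      simp
    · have hklt : k < N := by omega
      rw [hmin k hklt]
      simp only [if_true]
      have : (2 : Int) + (k : Int) + 1 = 2 + ((k + 1 : Nat) : Int) := by push_cast; ring
      rw [this]
      exact ih (k + 1) (by omega) (by omega)

-- ---- B's gap scan over a sorted list finds the first free index ----

theorem gapScan_spec : ∀ (l : List Int), l.Pairwise (· ≤ ·) → ∀ (a m : Int),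
    a ≤ m → m ∉ l → (∀ j, a ≤ j → j < m → j ∈ l) → gapScan l a = m := by
  intro l
  induction l with
  | nil =>
    intro _ a m ham hmem hall
    have : ¬ a < m := fun h => (List.not_mem_nil) (hall a le_rfl h)
    simp only [gapScan]
    omega
  | cons i rest ih =>
    intro hp a m ham hmem hall
    have hrest := (List.pairwise_cons.mp hp).2
    have hile := (List.pairwise_cons.mp hp).1
    by_cases hia : i = a
    · subst hia
      have hne : i ≠ m := fun h => hmem (h ▸ List.mem_cons_self)
      have him : i < m := by omega
      simp only [gapScan]
      refine ih hrest (i + 1) m (by omega) (fun h => hmem (List.mem_cons_of_mem _ h)) ?_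
      intro j hj1 hj2
      have : j ∈ i :: rest := hall j (by omega) hj2
      rcases List.mem_cons.mp this with h | h
      · omega
      · exact h
    · by_cases hai : a < i
      · simp only [gapScan, if_neg hia, if_pos hai]
        by_contra hne
        have ham' : a < m := by
          rcases lt_or_eq_of_le ham with h | h
          · exact h
          · exact absurd h hne
        have : a ∈ i :: rest := hall a le_rfl ham'
        rcases List.mem_cons.mp this with h | h
        · omega
        · have := hile a h; omega
      · have hlt : i < a := by omega
        simp only [gapScan, if_neg hia, if_neg hai]
        refine ih hrest a m ham (fun h => hmem (List.mem_cons_of_mem _ h)) ?_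
        intro j hj1 hj2
        have : j ∈ i :: rest := hall j hj1 hj2
        rcases List.mem_cons.mp this with h | h
        · omega
        · exact h

-- ---- a free index exists within the first keys.length + 1 candidates ----

theorem pigeonhole_free (keys : List String) (S : String) :
    ∃ n : Nat, n ≤ keys.length ∧ (S ++ PySem.Int.toStr (2 + (n : Int))) ∉ keys := by
  by_contra hc
  push Not at hc
  set f : Nat → String := fun n => S ++ PySem.Int.toStr (2 + (n : Int)) with hf
  have hinj : Function.Injective f := by
    intro a b hab
    have h1 : PySem.Int.toStr (2 + (a : Int)) = PySem.Int.toStr (2 + (b : Int)) := by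
      have := congrArg String.toList hab
      simp only [hf, String.toList_append] at this
      have := List.append_cancel_left this
      rw [← String.toList_inj]
      exact this
    have := toStr_inj _ _ (by omega) (by omega) h1
    omega
  set l : List String := (List.range (keys.length + 1)).map f with hl
  have hnd : l.Nodup := List.Nodup.map hinj (List.nodup_range)
  have hsub : ∀ x ∈ l, x ∈ keys := by
    intro x hx
    rw [hl, List.mem_map] at hx
    obtain ⟨n, hn, hfx⟩ := hx
    rw [List.mem_range] at hn
    exact hfx ▸ hc n (by omega)
  have hcard : l.length ≤ keys.length := by
    have h1 : l.toFinset.card = l.length := List.toFinset_card_of_nodup hnd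
    have h2 : l.toFinset ⊆ keys.toFinset := by
      intro x hx
      rw [List.mem_toFinset] at hx ⊢
      exact hsub x hx
    calc l.length = l.toFinset.card := h1.symm
      _ ≤ keys.toFinset.card := Finset.card_le_card h2
      _ ≤ keys.length := keys.toFinset_card_le
  rw [hl] at hcard
  simp at hcard

-- ===== VERDICT (by name: the statement is the Claim_ definition above) =====
theorem unique_method_key_spec : Claim_equal_unique_method_key := by
  intro methods key method _
  unfold Spec_unique_method_key unique_method_key unique_method_key_alt
  dsimp only
  set keys := methods.map Prod.fst with hkeys
  set S := key ++ pyTitle method with hS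
  rw [fold_collect]
  have hany : ∀ x : String, keys.any (· == x) = keys.contains x := by
    intro x
    rw [Bool.eq_iff_iff, List.any_eq_true, List.contains_iff_mem]
    constructor
    · rintro ⟨y, hy, he⟩
      rw [beq_iff_eq] at he
      exact he ▸ hy
    · intro h
      exact ⟨x, h, beq_self_eq_true x⟩
  have hanyk := hany key
  have hanyS := hany S
  simp only [Bool.false_or, List.nil_append, hanyk, hanyS]
  by_cases h1 : keys.contains key = true
  · rw [if_neg (not_not_intro h1), if_neg (not_not_intro h1)]
    by_cases h2 : keys.contains S = true
    · rw [if_neg (not_not_intro h2), if_neg (not_not_intro h2)]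
      -- the first free index
      obtain ⟨n₀, hn₀, hfree₀⟩ := pigeonhole_free keys S
      have hex : ∃ n : Nat, (S ++ PySem.Int.toStr (2 + (n : Int))) ∉ keys := ⟨n₀, hfree₀⟩
      set N := Nat.find hex with hN
      have hNfree : (S ++ PySem.Int.toStr (2 + (N : Int))) ∉ keys := Nat.find_spec hex
      have hNmin : ∀ t : Nat, t < N → (S ++ PySem.Int.toStr (2 + (t : Int))) ∈ keys := by
        intro t ht
        by_contra hc
        exact absurd (Nat.find_min' hex hc) (by omega)
      have hNle : N ≤ keys.length := le_trans (Nat.find_min' hex hfree₀) hn₀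
      -- A's side
      have hA : uniqLoopA keys S 2 (methods.length + 1) = S ++ PySem.Int.toStr (2 + (N : Int)) := by
        have h20 : (2 : Int) = 2 + ((0 : Nat) : Int) := by norm_num
        rw [h20]
        refine loopA_eq keys S N ?_ ?_ (methods.length + 1) 0 (by omega) ?_
        · rw [← Bool.not_eq_true, List.contains_iff_mem]; exact hNfree
        · intro t ht; rw [List.contains_iff_mem]; exact hNmin t ht
        · have : keys.length = methods.length := by rw [hkeys]; simp
          omega
      -- B's side
      have hchar : ∀ i : Int, i ∈ keys.flatMap (emit S) ↔ (2 ≤ i ∧ (S ++ PySem.Int.toStr i) ∈ keys) := by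
        intro i
        rw [List.mem_flatMap]
        constructor
        · rintro ⟨k, hk, hik⟩
          obtain ⟨h2i, hkeq⟩ := (mem_emit_iff S k i).mp hik
          exact ⟨h2i, hkeq ▸ hk⟩
        · rintro ⟨h2i, hmem⟩
          exact ⟨S ++ PySem.Int.toStr i, hmem, (mem_emit_iff S _ i).mpr ⟨h2i, rfl⟩⟩
      have hB : gapScan (PySem.List.sorted (keys.flatMap (emit S)) (fun x => x) false) 2
          = 2 + (N : Int) := by
        refine gapScan_spec _ ?_ 2 (2 + (N : Int)) (by omega) ?_ ?_
        · have := PySem.List.sorted_pairwise (xs := keys.flatMap (emit S)) (key := fun x => x)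
          simpa using this
        · rw [PySem.List.mem_sorted]
          intro hc
          exact hNfree ((hchar _).mp hc).2
        · intro j hj1 hj2
          rw [PySem.List.mem_sorted, hchar]
          refine ⟨hj1, ?_⟩
          have ht : j = 2 + ((j - 2).toNat : Int) := by omega
          have htlt : (j - 2).toNat < N := by omega
          rw [ht]
          exact hNmin _ htlt
      rw [hA, hB]
    · rw [if_pos h2, if_pos h2]
  · rw [if_pos h1, if_pos h1]
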